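-- pv_equiv track=rewrite | github.com/cedriclemercier/algorithms | MIDTERM/midterm.py | n3
-- ===== SOURCE A (Python) =====
-- def n3(A,B,C):
--     count =0
--     check=True
--     for i in A:
--         for j in B:
--             for k in C:
--                 if k == i or k == j or j == i:
--                     check = False
--                 count += 1
--
--     return check, count
-- ===== SOURCE B (Python) =====
-- def n3(A, B, C):
--     count = len(A) * len(B) * len(C)
--     if A and B and C:
--         sa, sb, sc = set(A), set(B), set(C)
--         check = not (sa & sb or sa & sc or sb & sc)
--     else:
--         check = True
--     return check, count
-- ===== Notes on version B (the rewrite author's own statement) =====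
-- stated objective: faster
-- what changed: Replaces the O(|A||B||C|) triple nested loop by the closed-form count len(A)*len(B)*len(C) and three pairwise set intersections (guarded by all-nonempty, since A's inner check only runs when all three lists are nonempty).
import Mathlib
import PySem

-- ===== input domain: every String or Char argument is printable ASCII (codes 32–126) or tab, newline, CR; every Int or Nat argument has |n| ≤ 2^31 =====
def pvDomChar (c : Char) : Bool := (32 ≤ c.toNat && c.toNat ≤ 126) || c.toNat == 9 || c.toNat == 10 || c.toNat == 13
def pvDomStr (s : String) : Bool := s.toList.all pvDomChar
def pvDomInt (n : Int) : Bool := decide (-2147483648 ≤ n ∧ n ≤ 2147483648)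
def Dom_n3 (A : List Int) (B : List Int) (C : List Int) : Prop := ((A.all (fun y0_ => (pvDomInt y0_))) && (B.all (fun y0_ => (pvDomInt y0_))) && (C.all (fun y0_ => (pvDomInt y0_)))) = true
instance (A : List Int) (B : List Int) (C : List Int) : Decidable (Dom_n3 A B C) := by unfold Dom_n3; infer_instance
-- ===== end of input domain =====

-- B replaces the O(|A|·|B|·|C|) triple loop by a closed-form count and pairwise set
-- intersections (with the empty-list edge handled as A's loop structure implies): asymptotically faster.

-- ===== PORT A =====
def n3 (A : List Int) (B : List Int) (C : List Int) : Bool × Int :=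
  A.foldl (fun s i =>
    B.foldl (fun s j =>
      C.foldl (fun s k =>
        ((if k == i || k == j || j == i then false else s.1), s.2 + 1)) s) s)
    (true, 0)

-- ===== PORT B =====
def n3_alt (A : List Int) (B : List Int) (C : List Int) : Bool × Int :=
  let count : Int := ((A.length * B.length * C.length : Nat) : Int)
  let check : Bool :=
    if A ≠ [] ∧ B ≠ [] ∧ C ≠ [] then
      let sa := PySem.Set.ofList A
      let sb := PySem.Set.ofList B
      let sc := PySem.Set.ofList C
      !(!(PySem.Set.inter sa sb).isEmpty || !(PySem.Set.inter sa sc).isEmpty ||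
        !(PySem.Set.inter sb sc).isEmpty)
    else true
  (check, count)

-- ===== PRECONDITION & SPEC =====
def Spec_n3 (A : List Int) (B : List Int) (C : List Int) (out : Bool × Int) : Prop := out = n3_alt A B C
instance (A : List Int) (B : List Int) (C : List Int) (out : Bool × Int) : Decidable (Spec_n3 A B C out) := by unfold Spec_n3; infer_instance

-- ===== CLAIM (what is proved, stated in full; the proofs are below) =====
def Claim_equal_n3 : Prop := ∀ (A : List Int) (B : List Int) (C : List Int), Dom_n3 A B C → Spec_n3 A B C (n3 A B C)

-- ===== LEMMAS AND PROOFS =====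

theorem foldC (C : List Int) (i j : Int) (s : Bool × Int) :
    C.foldl (fun s k => ((if k == i || k == j || j == i then false else s.1), s.2 + 1)) s
      = ((if C.any (fun k => k == i || k == j || j == i) then false else s.1),
         s.2 + (C.length : Int)) := by
  induction C generalizing s with
  | nil => simp
  | cons c cs ih =>
    simp only [List.foldl_cons]
    rw [ih]
    by_cases h : (c == i || c == j || j == i) = true <;> simp [h] <;> ring

theorem foldB (B C : List Int) (i : Int) (s : Bool × Int) :
    B.foldl (fun s j =>
      C.foldl (fun s k => ((if k == i || k == j || j == i then false else s.1), s.2 + 1)) s) s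
      = ((if B.any (fun j => C.any (fun k => k == i || k == j || j == i)) then false else s.1),
         s.2 + ((B.length * C.length : Nat) : Int)) := by
  induction B generalizing s with
  | nil => simp
  | cons b bs ih =>
    simp only [List.foldl_cons]
    rw [foldC, ih]
    by_cases h : (C.any fun k => k == i || k == b || b == i) = true <;>
      simp [h] <;> ring

theorem foldA (A B C : List Int) :
    n3 A B C
      = ((if A.any (fun i => B.any (fun j => C.any (fun k => k == i || k == j || j == i)))
          then false else true),
         ((A.length * B.length * C.length : Nat) : Int)) := by
  unfold n3
  suffices h : ∀ s : Bool × Int,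
      A.foldl (fun s i => B.foldl (fun s j =>
        C.foldl (fun s k => ((if k == i || k == j || j == i then false else s.1), s.2 + 1)) s) s) s
      = ((if A.any (fun i => B.any (fun j => C.any (fun k => k == i || k == j || j == i)))
          then false else s.1),
         s.2 + ((A.length * B.length * C.length : Nat) : Int)) by
    rw [h (true, 0)]; simp
  intro s
  induction A generalizing s with
  | nil => simp
  | cons a as ih =>
    simp only [List.foldl_cons]
    rw [foldB, ih]
    by_cases h : (B.any fun j => C.any fun k => k == a || k == j || j == a) = true <;>
      simp [h] <;> ring

theorem inter_ne_nil (X Y : List Int) (x : Int) (hx : x ∈ X) (hy : x ∈ Y) :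
    PySem.Set.inter (PySem.Set.ofList X) (PySem.Set.ofList Y) ≠ [] := by
  intro hemp
  have hm : x ∈ PySem.Set.inter (PySem.Set.ofList X) (PySem.Set.ofList Y) := by
    rw [PySem.Set.mem_inter, PySem.Set.mem_ofList, PySem.Set.mem_ofList]
    exact ⟨hx, hy⟩
  rw [hemp] at hm
  exact List.not_mem_nil hm

theorem inter_mem_of_ne_nil (X Y : List Int)
    (h : PySem.Set.inter (PySem.Set.ofList X) (PySem.Set.ofList Y) ≠ []) :
    ∃ x, x ∈ X ∧ x ∈ Y := by
  obtain ⟨x, hx⟩ := List.exists_mem_of_ne_nil _ h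
  rw [PySem.Set.mem_inter, PySem.Set.mem_ofList, PySem.Set.mem_ofList] at hx
  exact ⟨x, hx⟩

theorem any_iff (A B C : List Int) :
    (A.any (fun i => B.any (fun j => C.any (fun k => k == i || k == j || j == i))) = true)
      ↔ ((A ≠ [] ∧ B ≠ [] ∧ C ≠ []) ∧
          (PySem.Set.inter (PySem.Set.ofList A) (PySem.Set.ofList B) ≠ [] ∨
           PySem.Set.inter (PySem.Set.ofList A) (PySem.Set.ofList C) ≠ [] ∨
           PySem.Set.inter (PySem.Set.ofList B) (PySem.Set.ofList C) ≠ [])) := by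
  simp only [List.any_eq_true, Bool.or_eq_true, beq_iff_eq]
  constructor
  · rintro ⟨i, hi, j, hj, k, hk, h⟩
    refine ⟨⟨List.ne_nil_of_mem hi, List.ne_nil_of_mem hj, List.ne_nil_of_mem hk⟩, ?_⟩
    rcases h with (h | h) | h
    · exact Or.inr (Or.inl (inter_ne_nil A C k (h ▸ hi) hk))
    · exact Or.inr (Or.inr (inter_ne_nil B C k (h ▸ hj) hk))
    · exact Or.inl (inter_ne_nil A B j (h ▸ hi) hj)
  · rintro ⟨⟨hA, hB, hC⟩, h⟩
    obtain ⟨a, ha⟩ := List.exists_mem_of_ne_nil _ hA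
    obtain ⟨b, hb⟩ := List.exists_mem_of_ne_nil _ hB
    obtain ⟨c, hc⟩ := List.exists_mem_of_ne_nil _ hC
    rcases h with h | h | h
    · obtain ⟨x, hx1, hx2⟩ := inter_mem_of_ne_nil A B h
      exact ⟨x, hx1, x, hx2, c, hc, Or.inr rfl⟩
    · obtain ⟨x, hx1, hx2⟩ := inter_mem_of_ne_nil A C h
      exact ⟨x, hx1, b, hb, x, hx2, Or.inl (Or.inl rfl)⟩
    · obtain ⟨x, hx1, hx2⟩ := inter_mem_of_ne_nil B C h
      exact ⟨a, ha, x, hx1, x, hx2, Or.inl (Or.inr rfl)⟩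

-- ===== VERDICT (by name: the statement is the Claim_ definition above) =====
theorem n3_spec : Claim_equal_n3 := by
  intro A B C _
  show n3 A B C = n3_alt A B C
  rw [foldA]
  unfold n3_alt
  refine Prod.ext ?_ rfl
  by_cases h : (A.any (fun i => B.any (fun j => C.any (fun k => k == i || k == j || j == i)))) = true
  · have h' := (any_iff A B C).mp h
    rw [if_pos h'.1]
    simp only [h, if_true]
    rcases h'.2 with h2 | h2 | h2 <;>
      simp [List.isEmpty_iff, h2]
  · have h' : ¬ _ := fun hp => h ((any_iff A B C).mpr hp)
    simp only [Bool.not_eq_true] at h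
    simp only [h, Bool.false_eq_true, if_false]
    by_cases hne : A ≠ [] ∧ B ≠ [] ∧ C ≠ []
    · rw [if_pos hne]
      have h3 : ¬ (PySem.Set.inter (PySem.Set.ofList A) (PySem.Set.ofList B) ≠ [] ∨
           PySem.Set.inter (PySem.Set.ofList A) (PySem.Set.ofList C) ≠ [] ∨
           PySem.Set.inter (PySem.Set.ofList B) (PySem.Set.ofList C) ≠ []) :=
        fun hd => h' ⟨hne, hd⟩
      simp only [not_or, ne_eq, not_not] at h3
      simp [h3.1, h3.2.1, h3.2.2]
    · rw [if_neg hne]
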